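-- pv_equiv track=rewrite | github.com/MacHu-GWU/cottonformation-project | cottonformation/code/spec.py | order_by_dependencies
-- ===== SOURCE A (Python) =====
-- import typing
-- from collections import OrderedDict
--
-- def order_by_dependencies(dependency_mapper: typing.Dict[str, typing.Set[str]]) \
--     -> typing.Tuple[typing.List[str], typing.List[str]]:
--     """
--     You have to make sure there's no cycle dependency.
--     """
--     ordered_dict = OrderedDict()
--     for _ in range(1000):
--         # if there's no child's len(parent_set) == 0, there's no change
--         # so we can stop now
--         can_we_stop = True
--         for child, parent_set in list(dependency_mapper.items()):
--             if len(parent_set) == 0: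
--                 ordered_dict[child] = 1
--                 for parent_set in dependency_mapper.values():
--                     if child in parent_set:
--                         parent_set.remove(child)
--             else:
--                 can_we_stop = False
--
--         if can_we_stop:
--             break
--
--     # if there's cycled dependency, they will be put at the end of the list
--     # and we collect this information for future use
--     cycled_keys = list()
--     for child in dependency_mapper:
--         if child not in ordered_dict:
--             ordered_dict[child] = 1
--             cycled_keys.append(child)
--
--     ordered_keys = list(ordered_dict)
--     return ordered_keys, cycled_keys
-- ===== SOURCE B (Python) =====
-- def order_by_dependencies(dependency_mapper):
--     """
--     Kahn-style layered topological sort: reverse-edge index + indegree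
--     counters replace A's repeated full rescans of all parent sets.
--     Note: unlike A, this does not mutate the caller's parent sets.
--     """
--     indeg = {child: len(parents) for child, parents in dependency_mapper.items()}
--     dependents = {}
--     for child, parents in dependency_mapper.items():
--         for p in parents:
--             dependents.setdefault(p, []).append(child)
--     pending = list(dependency_mapper)
--     ordered = []
--     for _ in range(1000):
--         if not pending:
--             break
--         emitted = False
--         still = []
--         for k in pending:
--             if indeg[k] == 0:
--                 ordered.append(k)
--                 emitted = True
--                 for c in dependents.get(k, []):
--                     indeg[c] -= 1
--             else:
--                 still.append(k)
--         pending = still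
--         if not emitted:
--             break
--     return ordered + pending, pending
-- ===== Notes on version B (the rewrite author's own statement) =====
-- stated objective: faster
-- what changed: A rescans every parent set of every key on each of up to 1000 passes and removes emitted keys by sweeping all sets; B precomputes a reverse-edge index and integer indegree counters once, keeps only not-yet-emitted keys in a shrinking pending list, and stops as soon as a pass emits nothing, so each edge is touched O(1) times per emission instead of being rescanned every pass.
import Mathlib
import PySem

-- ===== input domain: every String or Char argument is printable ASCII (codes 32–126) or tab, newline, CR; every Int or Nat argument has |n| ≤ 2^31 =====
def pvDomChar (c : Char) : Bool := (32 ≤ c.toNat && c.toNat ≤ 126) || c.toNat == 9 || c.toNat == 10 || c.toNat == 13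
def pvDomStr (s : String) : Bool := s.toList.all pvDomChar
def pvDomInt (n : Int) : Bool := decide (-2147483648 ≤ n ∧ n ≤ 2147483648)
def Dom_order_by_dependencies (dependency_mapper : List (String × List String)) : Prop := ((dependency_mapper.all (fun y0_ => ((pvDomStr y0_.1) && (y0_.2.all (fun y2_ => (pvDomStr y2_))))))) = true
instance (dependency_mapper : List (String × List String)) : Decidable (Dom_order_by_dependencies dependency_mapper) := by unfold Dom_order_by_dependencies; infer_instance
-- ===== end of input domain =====

-- B replaces A's repeated full rescans of all parent sets with a reverse-edge index, indegree
-- counters and a shrinking pending list (objective: faster). A mutates the caller's parent sets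
-- in place; B does not — the equivalence proved here is about the return value only.

-- ===== PORT A =====
-- 'for parent_set in dependency_mapper.values(): if child in parent_set: parent_set.remove(child)'
def pvRemoveAllA (dm : PySem.Dict String (List String)) (child : String) :
    PySem.Dict String (List String) :=
  PySem.Dict.mk (dm.items.map (fun kv => (kv.1, PySem.Set.discard kv.2 child)))

-- one pass over the snapshot list(dependency_mapper.items()); the snapshot's value objects are
-- the live set objects, so the emptiness test reads the CURRENT dict value for the key
def pvPassA (snapshot : List (String × List String))
    (st : PySem.Dict String (List String) × PySem.Dict String Int × Bool) :
    PySem.Dict String (List String) × PySem.Dict String Int × Bool :=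
  snapshot.foldl (fun st kv =>
    if (st.1.getD kv.1 []).length = 0 then
      (pvRemoveAllA st.1 kv.1, st.2.1.insert kv.1 1, st.2.2)
    else (st.1, st.2.1, false)) st

-- 'for _ in range(1000): … if can_we_stop: break'
def pvLoopA : Nat → PySem.Dict String (List String) → PySem.Dict String Int →
    PySem.Dict String (List String) × PySem.Dict String Int
  | 0, dm, od => (dm, od)
  | n+1, dm, od =>
    let r := pvPassA dm.items (dm, od, true)
    if r.2.2 then (r.1, r.2.1) else pvLoopA n r.1 r.2.1

def order_by_dependencies (dependency_mapper : List (String × List String)) :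
    List String × List String :=
  let r := pvLoopA 1000 (PySem.Dict.mk dependency_mapper) PySem.Dict.empty
  let fin := r.1.keys.foldl (fun (st : PySem.Dict String Int × List String) child =>
    if st.1.contains child then st else (st.1.insert child 1, st.2 ++ [child])) (r.2, [])
  (fin.1.keys, fin.2)

-- ===== PORT B =====
-- one pass over the pending keys: emit zero-indegree keys, decrement their dependents
def pvPassB (deps : PySem.Dict String (List String))
    (st : PySem.Dict String Int × List String × List String × Bool) (pending : List String) :
    PySem.Dict String Int × List String × List String × Bool :=
  pending.foldl (fun st k =>
    if st.1.getD k 0 = 0 then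
      ((deps.getD k []).foldl (fun d c => d.insert c (d.getD c 0 - 1)) st.1,
       st.2.1 ++ [k], st.2.2.1, true)
    else (st.1, st.2.1, st.2.2.1 ++ [k], st.2.2.2)) st

def pvLoopB (deps : PySem.Dict String (List String)) :
    Nat → PySem.Dict String Int → List String → List String → List String × List String
  | 0, _, ordered, pending => (ordered, pending)
  | n+1, indeg, ordered, pending =>
    if pending.isEmpty then (ordered, pending)
    else
      let r := pvPassB deps (indeg, ordered, [], false) pending
      if r.2.2.2 then pvLoopB deps n r.1 r.2.1 r.2.2.1
      else (r.2.1, r.2.2.1)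

def order_by_dependencies_alt (dependency_mapper : List (String × List String)) :
    List String × List String :=
  let indeg := dependency_mapper.foldl
    (fun d kv => d.insert kv.1 (kv.2.length : Int)) PySem.Dict.empty
  let deps := dependency_mapper.foldl
    (fun d kv => kv.2.foldl (fun d p => d.modify p [] (· ++ [kv.1])) d) PySem.Dict.empty
  let r := pvLoopB deps 1000 indeg [] (dependency_mapper.map Prod.fst)
  (r.1 ++ r.2, r.2)

-- ===== PRECONDITION & SPEC =====
-- Pre_ excludes association lists with duplicate keys, which do not encode a Python dict
-- (the Python function's argument is a dict, so it can never receive such an input).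
def Pre_order_by_dependencies (dependency_mapper : List (String × List String)) : Prop :=
  (dependency_mapper.map Prod.fst).Nodup

instance (dependency_mapper : List (String × List String)) :
    Decidable (Pre_order_by_dependencies dependency_mapper) := by
  unfold Pre_order_by_dependencies; infer_instance

def pvWitness_order_by_dependencies : (List (String × List String)) :=
  [("a", []), ("b", ["a"]), ("c", ["c", "b"])]

def Spec_order_by_dependencies (dependency_mapper : List (String × List String))
    (out : List String × List String) : Prop :=
  out = order_by_dependencies_alt dependency_mapper

instance (dependency_mapper : List (String × List String)) (out : List String × List String) :
    Decidable (Spec_order_by_dependencies dependency_mapper out) := by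
  unfold Spec_order_by_dependencies; infer_instance

-- ===== CLAIM (what is proved, stated in full; the proofs are below) =====
def Claim_equal_order_by_dependencies : Prop :=
  ∀ (dependency_mapper : List (String × List String)),
    Dom_order_by_dependencies dependency_mapper →
    Pre_order_by_dependencies dependency_mapper →
    Spec_order_by_dependencies dependency_mapper (order_by_dependencies dependency_mapper)

-- ===== LEMMAS AND PROOFS =====

-- the state abstraction: after emitting the keys of `o` (in that order),
-- A's dict has every parent set filtered by `∉ o` and its ordered_dict is `o ↦ 1`.
def pvDmOf (dm : List (String × List String)) (o : List String) :
    PySem.Dict String (List String) :=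
  PySem.Dict.mk (dm.map (fun kv => (kv.1, kv.2.filter (fun p => !(o.contains p)))))

def pvOdOf (o : List String) : PySem.Dict String Int :=
  PySem.Dict.mk (o.map (fun k => (k, 1)))

def pvDepsOf (dm : List (String × List String)) : PySem.Dict String (List String) :=
  dm.foldl (fun d kv => kv.2.foldl (fun d p => d.modify p [] (· ++ [kv.1])) d) PySem.Dict.empty

def pvInvDeg (dm : List (String × List String)) (indeg : PySem.Dict String Int)
    (o : List String) : Prop :=
  ∀ kv ∈ dm, indeg.getD kv.1 0 = ((kv.2.filter (fun p => !(o.contains p))).length : Int)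

def pvClosed (dm : List (String × List String)) (o : List String) : Prop :=
  ∀ kv ∈ dm, kv.1 ∈ o → ∀ p ∈ kv.2, p ∈ o

lemma pv_filter_key_eq (dm : List (String × List String)) (kv : String × List String)
    (hnd : (dm.map Prod.fst).Nodup) (hkv : kv ∈ dm) :
    dm.filter (fun kv' => kv'.1 == kv.1) = [kv] := by
  induction dm with
  | nil => cases hkv
  | cons h t ih =>
    simp only [List.map_cons, List.nodup_cons] at hnd
    rcases List.mem_cons.mp hkv with rfl | hm
    · have h0 : t.filter (fun kv' => kv'.1 == kv.1) = [] := by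
        refine List.filter_eq_nil_iff.mpr ?_
        intro a ha hb
        exact hnd.1 (beq_iff_eq.mp hb ▸ List.mem_map_of_mem ha)
      simp [h0]
    · have hne : (h.1 == kv.1) = false := by
        refine beq_eq_false_iff_ne.mpr ?_
        intro he
        exact hnd.1 (he ▸ List.mem_map_of_mem hm)
      simp only [List.filter_cons, hne, Bool.false_eq_true, if_false]
      exact ih hnd.2 hm

lemma pv_key_unique (dm : List (String × List String)) (kv kv' : String × List String)
    (hnd : (dm.map Prod.fst).Nodup) (hkv : kv ∈ dm) (hkv' : kv' ∈ dm)
    (h : kv'.1 = kv.1) : kv' = kv := by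
  have hf := pv_filter_key_eq dm kv hnd hkv
  have hmem : kv' ∈ dm.filter (fun x => x.1 == kv.1) :=
    List.mem_filter.mpr ⟨hkv', by simp [h]⟩
  rw [hf] at hmem
  simpa using hmem

lemma pv_getD_dmOf (dm : List (String × List String)) (o : List String)
    (kv : String × List String) (hnd : (dm.map Prod.fst).Nodup) (hkv : kv ∈ dm) :
    (pvDmOf dm o).getD kv.1 [] = kv.2.filter (fun p => !(o.contains p)) := by
  have hmem : (kv.1, kv.2.filter (fun p => !(o.contains p))) ∈ (pvDmOf dm o).items := by
    exact List.mem_map_of_mem (f := fun kv => (kv.1, kv.2.filter (fun p => !(o.contains p)))) hkv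
  have hkeys : (pvDmOf dm o).keys.Nodup := by
    simpa [pvDmOf, PySem.Dict.keys, List.map_map, Function.comp] using hnd
  exact PySem.Dict.getD_of_mem_items _ hmem hkeys []

lemma pv_removeAll_dmOf (dm : List (String × List String)) (o : List String) (c : String) :
    pvRemoveAllA (pvDmOf dm o) c = pvDmOf dm (o ++ [c]) := by
  unfold pvRemoveAllA pvDmOf PySem.Set.discard
  congr 1
  rw [show (PySem.Dict.mk (dm.map (fun kv => (kv.1, kv.2.filter (fun p => !(o.contains p)))))).items
      = dm.map (fun kv => (kv.1, kv.2.filter (fun p => !(o.contains p)))) from rfl]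
  rw [List.map_map]
  apply List.map_congr_left
  intro kv _
  simp only [Function.comp]
  congr 1
  rw [List.filter_filter]
  apply List.filter_congr
  intro p _
  by_cases h1 : p ∈ o <;> by_cases h2 : p = c <;>
    simp [List.contains_eq_mem, List.mem_append, h1, h2]

lemma pv_dmOf_mem (dm : List (String × List String)) (o : List String) (c : String)
    (hc : c ∈ o) : pvDmOf dm (o ++ [c]) = pvDmOf dm o := by
  unfold pvDmOf
  congr 1
  apply List.map_congr_left
  intro kv _
  congr 1
  apply List.filter_congr
  intro p _
  by_cases h2 : p = c
  · subst h2
    simp [List.contains_eq_mem, List.mem_append, hc]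
  · by_cases h1 : p ∈ o <;> simp [List.contains_eq_mem, List.mem_append, h1, h2]

lemma pv_odOf_contains (o : List String) (c : String) :
    (pvOdOf o).contains c = o.contains c := by
  simp [pvOdOf, PySem.Dict.contains_mk, List.contains_eq_mem, List.any_eq]

lemma pv_odOf_keys (o : List String) : (pvOdOf o).keys = o := by
  simp [pvOdOf, PySem.Dict.keys, List.map_map, Function.comp_def]

lemma pv_odOf_insert_mem (o : List String) (c : String) (hc : c ∈ o) :
    (pvOdOf o).insert c 1 = pvOdOf o := by
  have hc' : (pvOdOf o).contains c = true := by
    rw [pv_odOf_contains]; simp [List.contains_eq_mem, hc]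
  apply PySem.Dict.ext
  rw [PySem.Dict.items_insert_of_contains _ _ hc']
  rw [show (pvOdOf o).items = o.map (fun k => (k, (1 : Int))) from rfl]
  rw [List.map_map]
  apply List.map_congr_left
  intro k _
  by_cases h : k = c <;> simp [h]

lemma pv_odOf_insert_not_mem (o : List String) (c : String) (hc : c ∉ o) :
    (pvOdOf o).insert c 1 = pvOdOf (o ++ [c]) := by
  have hc' : (pvOdOf o).contains c = false := by
    rw [pv_odOf_contains]; simp [List.contains_eq_mem, hc]
  apply PySem.Dict.ext
  rw [PySem.Dict.items_insert_of_not_contains _ _ hc']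
  simp [pvOdOf]

lemma pv_foldl_dec (l : List String) (d : PySem.Dict String Int) (v : String) :
    (l.foldl (fun d c => d.insert c (d.getD c 0 - 1)) d).getD v 0
      = d.getD v 0 - (l.count v : Int) := by
  induction l generalizing d with
  | nil => simp
  | cons c t ih =>
    simp only [List.foldl_cons]
    rw [ih, PySem.Dict.getD_insert]
    by_cases h : v = c
    · subst h
      simp only [List.count_cons, beq_self_eq_true, if_pos]
      push_cast
      ring
    · have hvc : (v == c) = false := beq_eq_false_iff_ne.mpr h
      have hcv : (c == v) = false := beq_eq_false_iff_ne.mpr (fun hh => h hh.symm)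
      simp [if_neg h, List.count_cons, hcv]

lemma pv_pairs_replicate (v : List String) (a c : String) :
    ((v.map (fun p => (p, a))).filter (fun pr => pr.1 == c)).map (fun x => x.2)
      = List.replicate (v.count c) a := by
  induction v with
  | nil => simp
  | cons p t ih =>
    by_cases h : p = c
    · subst h
      simp [ih, List.replicate_succ]
    · have : (p == c) = false := beq_eq_false_iff_ne.mpr h
      simp [this, List.count_cons, ih]

lemma pv_deps_fold_count (dmT : List (String × List String)) (k c : String) :
    ∀ d : PySem.Dict String (List String),
    ((dmT.foldl (fun d kv => kv.2.foldl (fun d p => d.modify p [] (· ++ [kv.1])) d) d).getD k []).count c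
      = (d.getD k []).count c
        + ((dmT.filter (fun kv => kv.1 == c)).map (fun kv => kv.2.count k)).sum := by
  induction dmT with
  | nil => intro d; simp
  | cons kv t ih =>
    intro d
    simp only [List.foldl_cons]
    rw [ih]
    have hin : ((kv.2.foldl (fun d p => d.modify p [] (· ++ [kv.1])) d).getD k []).count c
        = (d.getD k []).count c + (if kv.1 = c then kv.2.count k else 0) := by
      have he : kv.2.foldl (fun d p => d.modify p [] (· ++ [kv.1])) d
          = (kv.2.map (fun p => (p, kv.1))).foldl (fun d pr => d.modify pr.1 [] (· ++ [pr.2])) d := by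
        rw [List.foldl_map]
      rw [he, PySem.Dict.getD_foldl_modify_append, pv_pairs_replicate,
        List.count_append, List.count_replicate]
      by_cases h : kv.1 = c
      · subst h; simp
      · have : (kv.1 == c) = false := beq_eq_false_iff_ne.mpr h
        simp [this, h]
    rw [hin]
    simp only [List.filter_cons]
    by_cases h : kv.1 = c
    · subst h; simp [List.map_cons]; omega
    · have : (kv.1 == c) = false := beq_eq_false_iff_ne.mpr h
      simp [this, h]

lemma pv_deps_count (dm : List (String × List String)) (hnd : (dm.map Prod.fst).Nodup)
    (kv : String × List String) (hkv : kv ∈ dm) (k : String) :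
    ((pvDepsOf dm).getD k []).count kv.1 = kv.2.count k := by
  unfold pvDepsOf
  rw [pv_deps_fold_count, pv_filter_key_eq dm kv hnd hkv]
  simp

lemma pv_len_filter_snoc (v : List String) (o : List String) (c : String) (hc : c ∉ o) :
    (v.filter (fun p => !((o ++ [c]).contains p))).length + v.count c
      = (v.filter (fun p => !(o.contains p))).length := by
  induction v with
  | nil => simp
  | cons p t ih =>
    by_cases h2 : p = c
    · subst h2
      have h1 : p ∉ o := hc
      simp_all
      omega
    · have hb1 : (c == p) = false := beq_eq_false_iff_ne.mpr (fun hh => h2 hh.symm)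
      by_cases h1 : p ∈ o
      · simp_all
      · simp_all
        omega

-- one pass of A over a suffix of the items and of B over the matching pending suffix
lemma pv_pass_sim (dm : List (String × List String)) (hnd : (dm.map Prod.fst).Nodup) :
    ∀ (rest : List (String × List String)), (∀ kv ∈ rest, kv ∈ dm) →
    (rest.map Prod.fst).Nodup →
    ∀ (o still : List String) (indeg : PySem.Dict String Int) (sA eB : Bool),
    pvClosed dm o → o.Nodup → pvInvDeg dm indeg o →
    ∃ oE : List String,
      pvClosed dm (o ++ oE) ∧ (o ++ oE).Nodup ∧ (∀ x ∈ oE, x ∈ rest.map Prod.fst) ∧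
      (∃ indeg' : PySem.Dict String Int, pvInvDeg dm indeg' (o ++ oE) ∧
        pvPassA rest (pvDmOf dm o, pvOdOf o, sA)
          = (pvDmOf dm (o ++ oE), pvOdOf (o ++ oE),
             sA && ((rest.map Prod.fst).filter (fun k => !((o ++ oE).contains k))).isEmpty) ∧
        pvPassB (pvDepsOf dm) (indeg, o, still, eB)
            ((rest.map Prod.fst).filter (fun k => !(o.contains k)))
          = (indeg', o ++ oE,
             still ++ (rest.map Prod.fst).filter (fun k => !((o ++ oE).contains k)),
             eB || !oE.isEmpty)) := by
  intro rest
  induction rest with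
  | nil =>
    intro _ _ o still indeg sA eB hC hond hdeg
    exact ⟨[], by simpa using hC, by simpa using hond, by simp, indeg, by simpa using hdeg,
      by simp [pvPassA], by simp [pvPassB]⟩
  | cons kv rest ih =>
    intro hsub hrnd o still indeg sA eB hC hond hdeg
    have hkv : kv ∈ dm := hsub kv (by simp)
    have hsub' : ∀ x ∈ rest, x ∈ dm := fun x hx => hsub x (List.mem_cons_of_mem _ hx)
    simp only [List.map_cons, List.nodup_cons] at hrnd
    obtain ⟨hknotin, hrnd'⟩ := hrnd
    have hA1 : (pvDmOf dm o).getD kv.1 [] = kv.2.filter (fun p => !(o.contains p)) :=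
      pv_getD_dmOf dm o kv hnd hkv
    by_cases hmem : kv.1 ∈ o
    · -- already emitted: A's visit is a no-op, B's pending does not contain the key
      have hfe : kv.2.filter (fun p => !(o.contains p)) = [] := by
        refine List.filter_eq_nil_iff.mpr ?_
        intro p hp
        simp [List.contains_eq_mem, hC kv hkv hmem p hp]
      obtain ⟨oE, c1, c2, c3, indeg', c4, c5, c6⟩ :=
        ih hsub' hrnd' o still indeg sA eB hC hond hdeg
      have hmem' : kv.1 ∈ o ++ oE := List.mem_append_left _ hmem
      have hstep : pvPassA (kv :: rest) (pvDmOf dm o, pvOdOf o, sA)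
          = pvPassA rest (pvDmOf dm o, pvOdOf o, sA) := by
        simp only [pvPassA, List.foldl_cons]
        congr 1
        rw [hA1, hfe, pv_removeAll_dmOf, pv_dmOf_mem dm o kv.1 hmem,
          pv_odOf_insert_mem o kv.1 hmem]
        simp only [List.length_nil, if_pos]
      have hf1 : ((kv :: rest).map Prod.fst).filter (fun k => !((o ++ oE).contains k))
          = (rest.map Prod.fst).filter (fun k => !((o ++ oE).contains k)) := by
        simp [List.contains_eq_mem, List.mem_append, hmem]
      have hf0 : ((kv :: rest).map Prod.fst).filter (fun k => !(o.contains k))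
          = (rest.map Prod.fst).filter (fun k => !(o.contains k)) := by
        simp [List.contains_eq_mem, hmem]
      refine ⟨oE, c1, c2, fun x hx => List.mem_cons_of_mem _ (c3 x hx), indeg', c4, ?_, ?_⟩
      · rw [hf1, hstep]; exact c5
      · rw [hf0, hf1]; exact c6
    · by_cases hfe : kv.2.filter (fun p => !(o.contains p)) = []
      · -- kv.1 is emitted now
        have hC' : pvClosed dm (o ++ [kv.1]) := by
          intro kv' hkv' hm' p hp
          rcases List.mem_append.mp hm' with h' | h'
          · exact List.mem_append_left _ (hC kv' hkv' h' p hp)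
          · have hkk : kv' = kv := pv_key_unique dm kv kv' hnd hkv hkv' (by simpa using h')
            subst hkk
            have hpo : p ∈ o := by
              by_contra hpno
              have hmemf : p ∈ kv'.2.filter (fun p => !(o.contains p)) :=
                List.mem_filter.mpr ⟨hp, by simp [List.contains_eq_mem, hpno]⟩
              rw [hfe] at hmemf
              cases hmemf
            exact List.mem_append_left _ hpo
        have hond' : (o ++ [kv.1]).Nodup := by
          rw [List.nodup_append]
          refine ⟨hond, List.nodup_singleton _, ?_⟩
          intro a ha b hb
          simp only [List.mem_singleton] at hb
          subst hb
          intro he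
          exact hmem (he ▸ ha)
        have hdeg' : pvInvDeg dm (((pvDepsOf dm).getD kv.1 []).foldl
            (fun d c => d.insert c (d.getD c 0 - 1)) indeg) (o ++ [kv.1]) := by
          intro kv' hkv'
          rw [pv_foldl_dec, pv_deps_count dm hnd kv' hkv' kv.1, hdeg kv' hkv']
          have hsn := pv_len_filter_snoc kv'.2 o kv.1 hmem
          omega
        obtain ⟨oE, c1, c2, c3, indeg', c4, c5, c6⟩ :=
          ih hsub' hrnd' (o ++ [kv.1]) still _ sA true hC' hond' hdeg'
        have hassoc : (o ++ [kv.1]) ++ oE = o ++ (kv.1 :: oE) := by simp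
        have hmemf : kv.1 ∈ o ++ (kv.1 :: oE) := by simp
        have hstep : pvPassA (kv :: rest) (pvDmOf dm o, pvOdOf o, sA)
            = pvPassA rest (pvDmOf dm (o ++ [kv.1]), pvOdOf (o ++ [kv.1]), sA) := by
          simp only [pvPassA, List.foldl_cons]
          congr 1
          rw [hA1, hfe, pv_removeAll_dmOf, pv_odOf_insert_not_mem o kv.1 hmem]
          simp
        have hpend : ((kv :: rest).map Prod.fst).filter (fun k => !(o.contains k))
            = kv.1 :: ((rest.map Prod.fst).filter (fun k => !(o.contains k))) := by
          simp [List.contains_eq_mem, hmem]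
        have hpend2 : (rest.map Prod.fst).filter (fun k => !(o.contains k))
            = (rest.map Prod.fst).filter (fun k => !((o ++ [kv.1]).contains k)) := by
          apply List.filter_congr
          intro x hx
          have hxne : x ≠ kv.1 := fun e => hknotin (e ▸ hx)
          simp [List.contains_eq_mem, List.mem_append, hxne]
        have htest : indeg.getD kv.1 0 = 0 := by
          rw [hdeg kv hkv, hfe]; simp
        have hfcons : ((kv :: rest).map Prod.fst).filter
              (fun k => !((o ++ (kv.1 :: oE)).contains k))
            = (rest.map Prod.fst).filter (fun k => !((o ++ (kv.1 :: oE)).contains k)) := by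
          simp [List.contains_eq_mem]
        refine ⟨kv.1 :: oE, by rw [← hassoc]; exact c1, by rw [← hassoc]; exact c2, ?_,
          indeg', by rw [← hassoc]; exact c4, ?_, ?_⟩
        · intro x hx
          rcases List.mem_cons.mp hx with rfl | hx'
          · simp
          · exact List.mem_cons_of_mem _ (c3 x hx')
        · rw [hstep, c5, hfcons, ← hassoc]
        · rw [hpend]
          have hBstep : pvPassB (pvDepsOf dm) (indeg, o, still, eB)
                (kv.1 :: ((rest.map Prod.fst).filter (fun k => !(o.contains k))))
              = pvPassB (pvDepsOf dm)
                (((pvDepsOf dm).getD kv.1 []).foldl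
                  (fun d c => d.insert c (d.getD c 0 - 1)) indeg,
                 o ++ [kv.1], still, true)
                ((rest.map Prod.fst).filter (fun k => !(o.contains k))) := by
            simp only [pvPassB, List.foldl_cons]
            congr 1
            simp [htest]
          rw [hBstep, hpend2, c6, hfcons, ← hassoc]
          simp
      · -- kv.1 is skipped: A clears the stop flag, B appends it to still
        have hnlen : ¬(kv.2.filter (fun p => !(o.contains p))).length = 0 := by
          simpa [List.length_eq_zero_iff] using hfe
        obtain ⟨oE, c1, c2, c3, indeg', c4, c5, c6⟩ :=
          ih hsub' hrnd' o (still ++ [kv.1]) indeg false eB hC hond hdeg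
        have hnoE : kv.1 ∉ oE := fun h => hknotin (c3 _ h)
        have hnotf : kv.1 ∉ o ++ oE := by
          simp only [List.mem_append]
          exact not_or.mpr ⟨hmem, hnoE⟩
        have hstep : pvPassA (kv :: rest) (pvDmOf dm o, pvOdOf o, sA)
            = pvPassA rest (pvDmOf dm o, pvOdOf o, false) := by
          simp only [pvPassA, List.foldl_cons]
          congr 1
          rw [hA1]
          simp only [if_neg hnlen]
        have hfcons : ((kv :: rest).map Prod.fst).filter (fun k => !((o ++ oE).contains k))
            = kv.1 :: ((rest.map Prod.fst).filter (fun k => !((o ++ oE).contains k))) := by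
          simp [List.contains_eq_mem, List.mem_append, hmem, hnoE]
        have hpend : ((kv :: rest).map Prod.fst).filter (fun k => !(o.contains k))
            = kv.1 :: ((rest.map Prod.fst).filter (fun k => !(o.contains k))) := by
          simp [List.contains_eq_mem, hmem]
        have htest : ¬indeg.getD kv.1 0 = 0 := by
          rw [hdeg kv hkv]
          simpa using hnlen
        refine ⟨oE, c1, c2, fun x hx => List.mem_cons_of_mem _ (c3 x hx), indeg', c4, ?_, ?_⟩
        · rw [hstep, c5, hfcons]
          simp
        · rw [hpend]
          have hBstep : pvPassB (pvDepsOf dm) (indeg, o, still, eB)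
                (kv.1 :: ((rest.map Prod.fst).filter (fun k => !(o.contains k))))
              = pvPassB (pvDepsOf dm) (indeg, o, still ++ [kv.1], eB)
                ((rest.map Prod.fst).filter (fun k => !(o.contains k))) := by
            simp only [pvPassB, List.foldl_cons]
            congr 1
            simp [htest]
          rw [hBstep, c6, hfcons]
          simp

lemma pv_loopB_nil (deps : PySem.Dict String (List String)) (n : Nat)
    (indeg : PySem.Dict String Int) (o : List String) :
    pvLoopB deps n indeg o [] = (o, []) := by
  cases n <;> simp [pvLoopB]

lemma pv_passA_items (dm : List (String × List String)) (o : List String)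
    (st : PySem.Dict String (List String) × PySem.Dict String Int × Bool) :
    pvPassA (pvDmOf dm o).items st = pvPassA dm st := by
  unfold pvPassA pvDmOf
  rw [show (PySem.Dict.mk (dm.map (fun kv => (kv.1, kv.2.filter (fun p => !(o.contains p)))))).items
      = dm.map (fun kv => (kv.1, kv.2.filter (fun p => !(o.contains p)))) from rfl]
  rw [List.foldl_map]

lemma pv_loopA_stuck (dm : List (String × List String)) (o : List String)
    (H : pvPassA dm (pvDmOf dm o, pvOdOf o, true) = (pvDmOf dm o, pvOdOf o, false)) :
    ∀ n, pvLoopA n (pvDmOf dm o) (pvOdOf o) = (pvDmOf dm o, pvOdOf o) := by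
  intro n
  induction n with
  | zero => rfl
  | succ m ihm =>
    rw [show pvLoopA (m + 1) (pvDmOf dm o) (pvOdOf o)
        = (let r := pvPassA (pvDmOf dm o).items (pvDmOf dm o, pvOdOf o, true);
           if r.2.2 then (r.1, r.2.1) else pvLoopA m r.1 r.2.1) from rfl]
    rw [pv_passA_items, H]
    simpa using ihm

lemma pv_loop_sim (dm : List (String × List String)) (hnd : (dm.map Prod.fst).Nodup) :
    ∀ (n : Nat) (o : List String) (indeg : PySem.Dict String Int),
    pvClosed dm o → o.Nodup → pvInvDeg dm indeg o →
    ∃ o' : List String,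
      o'.Nodup ∧
      pvLoopA n (pvDmOf dm o) (pvOdOf o) = (pvDmOf dm o', pvOdOf o') ∧
      pvLoopB (pvDepsOf dm) n indeg o ((dm.map Prod.fst).filter (fun k => !(o.contains k)))
        = (o', (dm.map Prod.fst).filter (fun k => !(o'.contains k))) := by
  intro n
  induction n with
  | zero =>
    intro o indeg hC hond hdeg
    exact ⟨o, hond, rfl, rfl⟩
  | succ m ihm =>
    intro o indeg hC hond hdeg
    obtain ⟨oE, c1, c2, c3, indeg', c4, c5, c6⟩ :=
      pv_pass_sim dm hnd dm (fun kv h => h) hnd o [] indeg true false hC hond hdeg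
    have hAunf : pvLoopA (m + 1) (pvDmOf dm o) (pvOdOf o)
        = (let r := pvPassA dm (pvDmOf dm o, pvOdOf o, true);
           if r.2.2 then (r.1, r.2.1) else pvLoopA m r.1 r.2.1) := by
      rw [show pvLoopA (m + 1) (pvDmOf dm o) (pvOdOf o)
          = (let r := pvPassA (pvDmOf dm o).items (pvDmOf dm o, pvOdOf o, true);
             if r.2.2 then (r.1, r.2.1) else pvLoopA m r.1 r.2.1) from rfl]
      rw [pv_passA_items]
    by_cases hpend : (dm.map Prod.fst).filter (fun k => !(o.contains k)) = []
    · -- nothing pending: the extra pass changes nothing and A stops too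
      have hoE : oE = [] := by
        rcases oE with _ | ⟨x, t⟩
        · rfl
        · exfalso
          have hx : x ∈ x :: t := by simp
          have hxk : x ∈ dm.map Prod.fst := c3 x hx
          have hxo : x ∉ o := by
            intro hxo
            exact List.disjoint_of_nodup_append c2 hxo hx
          have hmemf : x ∈ (dm.map Prod.fst).filter (fun k => !(o.contains k)) :=
            List.mem_filter.mpr ⟨hxk, by simp [List.contains_eq_mem, hxo]⟩
          rw [hpend] at hmemf
          cases hmemf
      subst hoE
      refine ⟨o, hond, ?_, ?_⟩
      · rw [hAunf]
        simp only [List.append_nil] at c5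
        rw [c5, hpend]
        simp
      · rw [hpend, pv_loopB_nil]
    · have hpf : ((dm.map Prod.fst).filter (fun k => !(o.contains k))).isEmpty = false := by
        simpa [List.isEmpty_iff] using hpend
      have hBunf : pvLoopB (pvDepsOf dm) (m + 1) indeg o
            ((dm.map Prod.fst).filter (fun k => !(o.contains k)))
          = (let r := pvPassB (pvDepsOf dm) (indeg, o, [], false)
               ((dm.map Prod.fst).filter (fun k => !(o.contains k)));
             if r.2.2.2 then pvLoopB (pvDepsOf dm) m r.1 r.2.1 r.2.2.1 else (r.2.1, r.2.2.1)) := by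
        rw [show pvLoopB (pvDepsOf dm) (m + 1) indeg o
              ((dm.map Prod.fst).filter (fun k => !(o.contains k)))
            = (if ((dm.map Prod.fst).filter (fun k => !(o.contains k))).isEmpty then
                (o, (dm.map Prod.fst).filter (fun k => !(o.contains k)))
              else
                (let r := pvPassB (pvDepsOf dm) (indeg, o, [], false)
                   ((dm.map Prod.fst).filter (fun k => !(o.contains k)));
                 if r.2.2.2 then pvLoopB (pvDepsOf dm) m r.1 r.2.1 r.2.2.1
                 else (r.2.1, r.2.2.1))) from rfl]
        rw [hpf]
        simp
      rcases oE with _ | ⟨x, tE⟩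
      · -- no emission: a stuck pass; A idles for the remaining fuel, B stops
        simp only [List.append_nil] at c1 c2 c4 c5 c6
        have hstuck : pvPassA dm (pvDmOf dm o, pvOdOf o, true) = (pvDmOf dm o, pvOdOf o, false) := by
          rw [c5, hpf]
          simp
        refine ⟨o, hond, ?_, ?_⟩
        · rw [hAunf, hstuck]
          simpa using pv_loopA_stuck dm o hstuck m
        · rw [hBunf, c6]
          simp
      · -- at least one emission
        have hoE : ¬(x :: tE).isEmpty = true := by simp
        by_cases hsadd : (dm.map Prod.fst).filter (fun k => !((o ++ x :: tE).contains k)) = []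
        · refine ⟨o ++ x :: tE, c2, ?_, ?_⟩
          · rw [hAunf, c5, hsadd]
            simp
          · rw [hBunf, c6]
            simp only [List.nil_append, Bool.false_or]
            rw [if_pos (by simp)]
            rw [hsadd, pv_loopB_nil]
        · obtain ⟨o', hnd', hA', hB'⟩ := ihm (o ++ x :: tE) indeg' c1 c2 c4
          refine ⟨o', hnd', ?_, ?_⟩
          · rw [hAunf, c5]
            have : ((dm.map Prod.fst).filter
                (fun k => !((o ++ x :: tE).contains k))).isEmpty = false := by
              simpa [List.isEmpty_iff] using hsadd
            rw [this]
            simpa using hA'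
          · rw [hBunf, c6]
            simp only [List.nil_append, Bool.false_or]
            rw [if_pos (by simp)]
            exact hB'

lemma pv_final_fold (ks : List String) (hnd : ks.Nodup) :
    ∀ (o cyc : List String),
    ks.foldl (fun (st : PySem.Dict String Int × List String) child =>
        if st.1.contains child then st else (st.1.insert child 1, st.2 ++ [child]))
        (pvOdOf o, cyc)
      = (pvOdOf (o ++ ks.filter (fun k => !(o.contains k))),
         cyc ++ ks.filter (fun k => !(o.contains k))) := by
  induction ks with
  | nil => intro o cyc; simp
  | cons k t ih =>
    intro o cyc
    simp only [List.nodup_cons] at hnd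
    simp only [List.foldl_cons]
    by_cases hk : k ∈ o
    · have hcont : (pvOdOf o).contains k = true := by
        rw [pv_odOf_contains]; simp [List.contains_eq_mem, hk]
      rw [if_pos hcont, ih hnd.2 o cyc]
      have hf : (k :: t).filter (fun k' => !(o.contains k')) = t.filter (fun k' => !(o.contains k')) := by
        simp [List.contains_eq_mem, hk]
      rw [hf]
    · have hcont : ¬(pvOdOf o).contains k = true := by
        rw [pv_odOf_contains]; simp [List.contains_eq_mem, hk]
      rw [if_neg hcont, pv_odOf_insert_not_mem o k hk, ih hnd.2 (o ++ [k]) (cyc ++ [k])]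
      have hf : (k :: t).filter (fun k' => !(o.contains k')) = k :: t.filter (fun k' => !(o.contains k')) := by
        simp [List.contains_eq_mem, hk]
      have hf2 : t.filter (fun k' => !((o ++ [k]).contains k')) = t.filter (fun k' => !(o.contains k')) := by
        apply List.filter_congr
        intro x hx
        have hxne : x ≠ k := fun e => hnd.1 (e ▸ hx)
        simp [List.contains_eq_mem, List.mem_append, hxne]
      rw [hf, hf2]
      simp

-- ===== VERDICT (by name: the statement is the Claim_ definition above) =====
theorem order_by_dependencies_spec : Claim_equal_order_by_dependencies := by
  intro dm _ hpre
  have hitems : (dm.foldl (fun d kv => d.insert kv.1 ((kv.2.length : Int))) PySem.Dict.empty).items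
      = dm.map (fun kv => (kv.1, (kv.2.length : Int))) := by
    have h := PySem.Dict.items_foldl_insert_fresh dm Prod.fst (fun kv => ((kv.2.length) : Int))
      PySem.Dict.empty (fun a _ => by simp) hpre
    simpa using h
  have hdeg0 : pvInvDeg dm
      (dm.foldl (fun d kv => d.insert kv.1 ((kv.2.length : Int))) PySem.Dict.empty) [] := by
    intro kv hkv
    have hkeys : (dm.foldl (fun d kv => d.insert kv.1 ((kv.2.length : Int)))
        PySem.Dict.empty).keys.Nodup := by
      simp only [PySem.Dict.keys, hitems, List.map_map]
      simpa [Function.comp_def] using hpre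
    have hm : (kv.1, (kv.2.length : Int))
        ∈ (dm.foldl (fun d kv => d.insert kv.1 ((kv.2.length : Int))) PySem.Dict.empty).items := by
      rw [hitems]; exact List.mem_map_of_mem hkv
    rw [PySem.Dict.getD_of_mem_items _ hm hkeys]
    simp
  have hmk : PySem.Dict.mk dm = pvDmOf dm [] := by
    unfold pvDmOf
    congr 1
    have h : dm.map (fun kv : String × List String =>
        (kv.1, kv.2.filter (fun p => !(([] : List String).contains p)))) = dm.map (fun kv => kv) := by
      apply List.map_congr_left
      intro kv _
      simp
    rw [h, List.map_id']
  have hC0 : pvClosed dm [] := by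
    intro kv _ h
    cases h
  obtain ⟨o', hnd', hA, hB⟩ := pv_loop_sim dm hpre 1000 []
    (dm.foldl (fun d kv => d.insert kv.1 ((kv.2.length : Int))) PySem.Dict.empty)
    hC0 List.nodup_nil hdeg0
  have hfilt0 : (dm.map Prod.fst).filter (fun k => !(([] : List String).contains k))
      = dm.map Prod.fst := by
    simp
  rw [hfilt0] at hB
  have hkeys1 : (pvDmOf dm o').keys = dm.map Prod.fst := by
    simp [pvDmOf, PySem.Dict.keys, List.map_map, Function.comp_def]
  rw [show pvOdOf [] = (PySem.Dict.empty : PySem.Dict String Int) from rfl] at hA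
  unfold Spec_order_by_dependencies order_by_dependencies order_by_dependencies_alt
  simp only [hmk,
    show (dm.foldl (fun d kv => kv.2.foldl (fun d p => d.modify p [] (· ++ [kv.1])) d)
      PySem.Dict.empty) = pvDepsOf dm from rfl, hA, hB, hkeys1]
  rw [pv_final_fold (dm.map Prod.fst) hpre o' []]
  simp [pv_odOf_keys]
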